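-- pv_equiv track=rewrite | github.com/skinsift/ml-api | routes/asesmen.py | koreksi_ingredients
-- ===== SOURCE A (Python) =====
-- import os, string
--
-- def remove_punctuation(text):
--     return text.translate(str.maketrans('', '', string.punctuation))
--
-- def levenshtein_distance(s1, s2):
--     if len(s1) < len(s2):
--         s1, s2 = s2, s1
--
--     previous_row = list(range(len(s2) + 1))
--     for i, c1 in enumerate(s1):
--         current_row = [i + 1]
--         for j, c2 in enumerate(s2):
--             insertions = previous_row[j + 1] + 1
--             deletions = current_row[j] + 1
--             substitutions = previous_row[j] + (c1 != c2)
--             current_row.append(min(insertions, deletions, substitutions))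
--         previous_row = current_row
--
--     return previous_row[-1]
--
-- def koreksi_ingredients(input_string, dataset_ingredients, threshold=1):
--     if not input_string:
--         return []
--
--     corrected_ingredients = []
--     strings_to_check = [
--         remove_punctuation(word.strip()).lower() for word in input_string.split(',')
--     ]
--
--     for string_to_check in strings_to_check:
--         if string_to_check in dataset_ingredients:
--             corrected_ingredients.append(string_to_check)
--         else:
--             closest_match = None
--             closest_distance = float('inf')
--
--             for candidate in dataset_ingredients:
--                 distance = levenshtein_distance(string_to_check, candidate)
--                 if distance < closest_distance:
--                     closest_distance = distance
--                     closest_match = candidate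
--
--             if closest_distance <= threshold:
--                 corrected_ingredients.append(closest_match)
--
--     return corrected_ingredients
-- ===== SOURCE B (Python) =====
-- # B: same correction task, different algorithm: per-distinct-word correction cache,
-- # set membership, min over (distance, index) tuples, and Levenshtein computed by
-- # anti-diagonal dynamic programming over a cell dictionary (vs A's two-row sweep).
-- import string
--
-- _PUNCT = set(string.punctuation)
--
--
-- def _normalize(word):
--     return ''.join(ch for ch in word.strip() if ch not in _PUNCT).lower()
--
--
-- def _lev_diag(a, b):
--     la, lb = len(a), len(b)
--     m = {(0, 0): 0}
--     for d in range(1, la + lb + 1):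
--         for i in range(max(0, d - lb), min(d, la) + 1):
--             j = d - i
--             if i == 0:
--                 m[(i, j)] = j
--             elif j == 0:
--                 m[(i, j)] = i
--             else:
--                 cost = 0 if a[i - 1] == b[j - 1] else 1
--                 m[(i, j)] = min(m[(i - 1, j)] + 1,
--                                 m[(i, j - 1)] + 1,
--                                 m[(i - 1, j - 1)] + cost)
--     return m[(la, lb)]
--
--
-- def koreksi_ingredients(input_string, dataset_ingredients, threshold=1):
--     if not input_string:
--         return []
--     words = [_normalize(w) for w in input_string.split(',')]
--     dataset_set = set(dataset_ingredients)
--     corrections = {}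
--     for w in dict.fromkeys(words):
--         if w in dataset_set:
--             corrections[w] = w
--         elif dataset_ingredients:
--             d, i = min((_lev_diag(w, c), i)
--                        for i, c in enumerate(dataset_ingredients))
--             corrections[w] = dataset_ingredients[i] if d <= threshold else None
--         else:
--             corrections[w] = None
--     return [corrections[w] for w in words if corrections[w] is not None]
-- ===== Notes on version B (the rewrite author's own statement) =====
-- stated objective: alternative
-- what changed: B replaces A's per-word two-row Levenshtein sweep and explicit best-tracking scan by an anti-diagonal DP over a cell dictionary, a min over (distance, index) tuples, set membership, and a per-distinct-word correction cache (dict.fromkeys dedup), so duplicate words are corrected once.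
import Mathlib
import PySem

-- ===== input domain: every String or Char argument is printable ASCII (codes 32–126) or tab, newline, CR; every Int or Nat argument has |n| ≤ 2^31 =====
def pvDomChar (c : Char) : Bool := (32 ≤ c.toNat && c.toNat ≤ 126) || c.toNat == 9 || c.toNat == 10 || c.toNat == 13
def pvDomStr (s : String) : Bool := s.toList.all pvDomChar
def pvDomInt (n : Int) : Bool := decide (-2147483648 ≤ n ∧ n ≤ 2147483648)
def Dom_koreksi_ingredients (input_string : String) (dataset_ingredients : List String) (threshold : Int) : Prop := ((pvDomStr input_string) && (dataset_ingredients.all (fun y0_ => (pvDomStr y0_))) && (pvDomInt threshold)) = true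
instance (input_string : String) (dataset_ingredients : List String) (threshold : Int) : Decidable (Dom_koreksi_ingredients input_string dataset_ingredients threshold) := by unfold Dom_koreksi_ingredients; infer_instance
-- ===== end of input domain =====

-- B replaces A's two-row Levenshtein sweep and best-tracking scan by an anti-diagonal
-- DP over a cell dictionary, a min over (distance, index) pairs, set membership and a
-- per-distinct-word correction cache (objective: alternative, same asymptotic cost).

-- ===== PORT A =====

-- string.punctuation
def pvPunctA : List Char := "!\"#$%&'()*+,-./:;<=>?@[\\]^_`{|}~".toList

-- remove_punctuation: str.translate deleting the punctuation characters = keep the others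
def removePunctA (t : List Char) : List Char := t.filter (fun c => !pvPunctA.contains c)

-- inner 'for j, c2 in enumerate(s2)' loop of levenshtein_distance; list indices are
-- always in range here, so Python's raising previous_row[j]/current_row[j] is List.getD
def levInnerA (c1 : Char) (prev : List Int) : List Int → Nat → List Char → List Int
  | cur, _, [] => cur
  | cur, j, c2 :: rest =>
      let insertions := prev.getD (j + 1) 0 + 1
      let deletions := cur.getD j 0 + 1
      let substitutions := prev.getD j 0 + (if c1 ≠ c2 then 1 else 0)
      levInnerA c1 prev (cur ++ [min (min insertions deletions) substitutions]) (j + 1) rest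

-- outer 'for i, c1 in enumerate(s1)' loop
def levOuterA (s2 : List Char) : List Int → Nat → List Char → List Int
  | prev, _, [] => prev
  | prev, i, c1 :: rest => levOuterA s2 (levInnerA c1 prev [(i : Int) + 1] 0 s2) (i + 1) rest

def levenshteinA (s1 s2 : String) : Int :=
  let p := if s1.toList.length < s2.toList.length then (s2, s1) else (s1, s2)
  let t1 := p.1.toList
  let t2 := p.2.toList
  let prev := levOuterA t2 (PySem.List.pyRange 0 ((t2.length : Int) + 1) 1) 0 t1
  PySem.List.pyGetD prev (-1) 0    -- previous_row[-1]

def normalizeA (w : List Char) : String :=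
  String.ofList (PySem.Chars.lower (removePunctA (PySem.Chars.strip w)))

def koreksi_ingredients (input_string : String) (dataset_ingredients : List String) (threshold : Int) : List String :=
  if input_string = "" then [] else
  let strings_to_check := (PySem.Chars.splitOn input_string.toList [',']).map normalizeA
  strings_to_check.foldl (fun corrected w =>
    if dataset_ingredients.contains w then corrected ++ [w]
    else
      -- closest_match = None, closest_distance = float('inf'): the not-yet-set state is none
      let best := dataset_ingredients.foldl (fun acc candidate =>
          match acc.2 with
          | none => (some candidate, some (levenshteinA w candidate))
          | some cd => if levenshteinA w candidate < cd then (some candidate, some (levenshteinA w candidate)) else acc)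
        ((none : Option String), (none : Option Int))
      match best with
      | (some m, some cd) => if cd ≤ threshold then corrected ++ [m] else corrected
      | _ => corrected) []

-- ===== PORT B =====

-- _PUNCT = set(string.punctuation)
def pvPunctB : PySem.Set Char := PySem.Set.ofList "!\"#$%&'()*+,-./:;<=>?@[\\]^_`{|}~".toList

-- ''.join(ch for ch in word.strip() if ch not in _PUNCT).lower()
def normalizeB (w : List Char) : String :=
  String.ofList (PySem.Chars.lower ((PySem.Chars.strip w).filter (fun c => !pvPunctB.contains c)))

-- one cell of the anti-diagonal DP: m[(i, j)] = ...; the raising dict lookups m[(i-1, j)]…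
-- are always present, so Dict.getD; a[i-1]/b[j-1] are always in range, so List.getD
def diagCellB (a b : List Char) (m : PySem.Dict (Nat × Nat) Int) (i j : Nat) : PySem.Dict (Nat × Nat) Int :=
  if i = 0 then m.insert (i, j) (j : Int)
  else if j = 0 then m.insert (i, j) (i : Int)
  else
    let cost : Int := if a.getD (i - 1) ' ' = b.getD (j - 1) ' ' then 0 else 1
    m.insert (i, j) (min (min (m.getD (i - 1, j) 0 + 1) (m.getD (i, j - 1) 0 + 1)) (m.getD (i - 1, j - 1) 0 + cost))

-- 'for i in range(max(0, d - lb), min(d, la) + 1)' (Nat subtraction is the max(0, ·))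
def diagRowB (a b : List Char) (d : Nat) : Nat → Nat → PySem.Dict (Nat × Nat) Int → PySem.Dict (Nat × Nat) Int
  | _, 0, m => m
  | i, cnt + 1, m => diagRowB a b d (i + 1) cnt (diagCellB a b m i (d - i))

-- 'for d in range(1, la + lb + 1)'
def diagLoopB (a b : List Char) : Nat → Nat → PySem.Dict (Nat × Nat) Int → PySem.Dict (Nat × Nat) Int
  | _, 0, m => m
  | d, cnt + 1, m =>
      let lo := d - b.length
      let hi := min d a.length
      diagLoopB a b (d + 1) cnt (diagRowB a b d lo (hi + 1 - lo) m)

def levDiagB (aS bS : String) : Int :=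
  let a := aS.toList
  let b := bS.toList
  let m := diagLoopB a b 1 (a.length + b.length) ((PySem.Dict.empty).insert (0, 0) 0)
  m.getD (a.length, b.length) 0

def koreksi_ingredients_alt (input_string : String) (dataset_ingredients : List String) (threshold : Int) : List String :=
  if input_string = "" then [] else
  let words := (PySem.Chars.splitOn input_string.toList [',']).map normalizeB
  let datasetSet : PySem.Set String := PySem.Set.ofList dataset_ingredients
  let corrections : PySem.Dict String (Option String) :=
    (PySem.List.dedup words).foldl (fun corr w =>
      if datasetSet.contains w then corr.insert w (some w)
      else if !dataset_ingredients.isEmpty then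
        match PySem.List.min2? ((PySem.List.enumerate dataset_ingredients).map (fun p => (levDiagB w p.2, p.1)))
            (fun q => q.1) (fun q => q.2) with
        | some (d, i) => corr.insert w (if d ≤ threshold then PySem.List.pyGet? dataset_ingredients i else none)
        | none => corr
      else corr.insert w none) PySem.Dict.empty
  words.filterMap (fun w => (corrections.get? w).getD none)

-- ===== PRECONDITION & SPEC =====
def Spec_koreksi_ingredients (input_string : String) (dataset_ingredients : List String) (threshold : Int) (out : List String) : Prop := out = koreksi_ingredients_alt input_string dataset_ingredients threshold
instance (input_string : String) (dataset_ingredients : List String) (threshold : Int) (out : List String) : Decidable (Spec_koreksi_ingredients input_string dataset_ingredients threshold out) := by unfold Spec_koreksi_ingredients; infer_instance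

-- ===== CLAIM (what is proved, stated in full; the proofs are below) =====
def Claim_equal_koreksi_ingredients : Prop := ∀ (input_string : String) (dataset_ingredients : List String) (threshold : Int), Dom_koreksi_ingredients input_string dataset_ingredients threshold → Spec_koreksi_ingredients input_string dataset_ingredients threshold (koreksi_ingredients input_string dataset_ingredients threshold)

-- ===== LEMMAS AND PROOFS =====

-- The common mathematical value: Levenshtein distance of the length-i prefix of a and
-- the length-j prefix of b, by the textbook recurrence on the last characters.
def Lp (a b : List Char) : Nat → Nat → Int
  | 0, j => (j : Int)
  | i + 1, 0 => (i : Int) + 1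
  | i + 1, j + 1 =>
      min (min (Lp a b i (j + 1) + 1) (Lp a b (i + 1) j + 1))
        (Lp a b i j + (if a.getD i ' ' = b.getD j ' ' then 0 else 1))
  termination_by i j => i + j

lemma Lp_zero_left (a b : List Char) (j : Nat) : Lp a b 0 j = (j : Int) := by
  cases j <;> simp [Lp]

lemma Lp_zero_right (a b : List Char) (i : Nat) : Lp a b i 0 = (i : Int) := by
  cases i <;> simp [Lp]

lemma Lp_succ_succ (a b : List Char) (i j : Nat) :
    Lp a b (i + 1) (j + 1) =
      min (min (Lp a b i (j + 1) + 1) (Lp a b (i + 1) j + 1))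
        (Lp a b i j + (if a.getD i ' ' = b.getD j ' ' then 0 else 1)) := by
  simp [Lp]

lemma Lp_symm (a b : List Char) : ∀ i j, Lp a b i j = Lp b a j i := by
  intro i
  induction i with
  | zero => intro j; rw [Lp_zero_left, Lp_zero_right]
  | succ i ih =>
    intro j
    induction j with
    | zero => rw [Lp_zero_left, Lp_zero_right]
    | succ j ihj =>
      rw [Lp_succ_succ, Lp_succ_succ, ih, ih, ihj]
      have hc : (if a.getD i ' ' = b.getD j ' ' then (0 : Int) else 1)
          = (if b.getD j ' ' = a.getD i ' ' then (0 : Int) else 1) := by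
        simp [eq_comm]
      rw [hc]
      omega

-- ===== A's row DP computes Lp =====

def rowSpec (a b : List Char) (i : Nat) : List Int :=
  (List.range (b.length + 1)).map (fun j => Lp a b i j)

lemma levInnerA_spec (a b : List Char) (i : Nat) :
    ∀ (rest : List Char) (j : Nat) (cur : List Int),
      b.drop j = rest → j ≤ b.length →
      cur = (List.range (j + 1)).map (fun t => Lp a b (i + 1) t) →
      levInnerA (a.getD i ' ') (rowSpec a b i) cur j rest = rowSpec a b (i + 1) := by
  intro rest
  induction rest with
  | nil =>
    intro j cur hdrop hle hcur
    have hj : j = b.length := by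
      have := List.drop_eq_nil_iff.1 hdrop
      omega
    subst hj
    rw [levInnerA, hcur]; rfl
  | cons c2 rest ih =>
    intro j cur hdrop hle hcur
    have hjlt : j < b.length := by
      by_contra h
      have : b.drop j = [] := List.drop_eq_nil_iff.2 (by omega)
      rw [this] at hdrop; exact (List.cons_ne_nil _ _ hdrop.symm).elim
    have h1 : b.drop j = b[j] :: b.drop (j + 1) := List.drop_eq_getElem_cons hjlt
    rw [hdrop] at h1
    have hc2 : b[j] = c2 := (List.cons_eq_cons.1 h1).1.symm
    have hdrop' : b.drop (j + 1) = rest := (List.cons_eq_cons.1 h1).2.symm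
    rw [levInnerA]
    have hprev1 : (rowSpec a b i).getD (j + 1) 0 = Lp a b i (j + 1) := by
      unfold rowSpec; exact PySem.List.getD_map_range _ _ _ _ (by omega)
    have hprev0 : (rowSpec a b i).getD j 0 = Lp a b i j := by
      unfold rowSpec; exact PySem.List.getD_map_range _ _ _ _ (by omega)
    have hcurj : cur.getD j 0 = Lp a b (i + 1) j := by
      rw [hcur]; exact PySem.List.getD_map_range _ _ _ _ (by omega)
    rw [hprev1, hprev0, hcurj]
    apply ih (j + 1) _ hdrop' (by omega)
    rw [hcur, List.range_succ (n := j + 1), List.map_append]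
    have hbj : b.getD j ' ' = c2 := by rw [List.getD_eq_getElem _ _ hjlt, hc2]
    have helem : min (min (Lp a b i (j + 1) + 1) (Lp a b (i + 1) j + 1))
        (Lp a b i j + (if a.getD i ' ' ≠ c2 then 1 else 0)) = Lp a b (i + 1) (j + 1) := by
      rw [Lp_succ_succ, hbj]
      by_cases h : a.getD i ' ' = c2
      · rw [if_neg (not_not_intro h), if_pos h]
      · rw [if_pos h, if_neg h]
    simp only [List.map_cons, List.map_nil, helem]

lemma levOuterA_spec (a b : List Char) :
    ∀ (rest : List Char) (i : Nat) (prev : List Int),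
      a.drop i = rest → i ≤ a.length → prev = rowSpec a b i →
      levOuterA b prev i rest = rowSpec a b a.length := by
  intro rest
  induction rest with
  | nil =>
    intro i prev hdrop hle hprev
    have : i = a.length := by
      have := List.drop_eq_nil_iff.1 hdrop
      omega
    subst this
    rw [levOuterA, hprev]
  | cons c1 rest ih =>
    intro i prev hdrop hle hprev
    have hlt : i < a.length := by
      by_contra h
      have : a.drop i = [] := List.drop_eq_nil_iff.2 (by omega)
      rw [this] at hdrop; exact (List.cons_ne_nil _ _ hdrop.symm).elim
    have h1 : a.drop i = a[i] :: a.drop (i + 1) := List.drop_eq_getElem_cons hlt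
    rw [hdrop] at h1
    have hc1 : a[i] = c1 := (List.cons_eq_cons.1 h1).1.symm
    have hdrop' : a.drop (i + 1) = rest := (List.cons_eq_cons.1 h1).2.symm
    rw [levOuterA, hprev]
    have hca : c1 = a.getD i ' ' := by rw [List.getD_eq_getElem _ _ hlt, hc1]
    rw [hca, levInnerA_spec a b i b 0 _ (by simp) (by omega)
      (by simp [List.range_succ, Lp_zero_right])]
    exact ih (i + 1) _ hdrop' (by omega) rfl

lemma levenshteinA_eq (w c : String) :
    levenshteinA w c = Lp w.toList c.toList w.toList.length c.toList.length := by
  unfold levenshteinA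
  have key : ∀ (a b : List Char), levOuterA b (PySem.List.pyRange 0 ((b.length : Int) + 1) 1) 0 a = rowSpec a b a.length := by
    intro a b
    apply levOuterA_spec a b a 0 _ (by simp) (by omega)
    rw [PySem.List.pyRange_one]
    have hn : (((b.length : Int) + 1) - 0).toNat = b.length + 1 := by omega
    rw [hn]
    unfold rowSpec
    exact List.map_congr_left (fun j hj => by rw [Lp_zero_left]; omega)
  have last : ∀ (a b : List Char), PySem.List.pyGetD (rowSpec a b a.length) (-1) 0 = Lp a b a.length b.length := by
    intro a b
    unfold rowSpec
    rw [List.range_succ, List.map_append]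
    exact PySem.List.pyGetD_neg_one_append_singleton _ _ _
  by_cases h : w.toList.length < c.toList.length
  · simp only [h, if_true]
    rw [key, last, Lp_symm]
  · simp only [h, if_false]
    rw [key, last]

-- ===== B's anti-diagonal DP computes Lp =====

def InvB (a b : List Char) (m : PySem.Dict (Nat × Nat) Int) (d : Nat) : Prop :=
  ∀ i j, i ≤ a.length → j ≤ b.length → i + j < d → m.get? (i, j) = some (Lp a b i j)

lemma diagCellB_eq (a b : List Char) (m : PySem.Dict (Nat × Nat) Int) (i j : Nat)
    (hi : i ≤ a.length) (hj : j ≤ b.length) (hinv : InvB a b m (i + j)) :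
    diagCellB a b m i j = m.insert (i, j) (Lp a b i j) := by
  unfold diagCellB
  by_cases h0 : i = 0
  · subst h0; rw [if_pos rfl, Lp_zero_left]
  · rw [if_neg h0]
    by_cases hj0 : j = 0
    · subst hj0; rw [if_pos rfl, Lp_zero_right]
    · rw [if_neg hj0]
      obtain ⟨i', rfl⟩ : ∃ i', i = i' + 1 := ⟨i - 1, by omega⟩
      obtain ⟨j', rfl⟩ : ∃ j', j = j' + 1 := ⟨j - 1, by omega⟩
      have g1 : m.getD (i' + 1 - 1, j' + 1) 0 = Lp a b i' (j' + 1) := by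
        have := hinv i' (j' + 1) (by omega) hj (by omega)
        simpa using PySem.Dict.getD_of_get?_eq_some _ _ this
      have g2 : m.getD (i' + 1, j' + 1 - 1) 0 = Lp a b (i' + 1) j' := by
        have := hinv (i' + 1) j' hi (by omega) (by omega)
        simpa using PySem.Dict.getD_of_get?_eq_some _ _ this
      have g3 : m.getD (i' + 1 - 1, j' + 1 - 1) 0 = Lp a b i' j' := by
        have := hinv i' j' (by omega) (by omega) (by omega)
        simpa using PySem.Dict.getD_of_get?_eq_some _ _ this
      rw [g1, g2, g3]
      simp only [Nat.add_sub_cancel]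
      rw [← Lp_succ_succ]

lemma diagRowB_spec (a b : List Char) (d : Nat) :
    ∀ (cnt i : Nat) (m : PySem.Dict (Nat × Nat) Int),
      i + cnt = min d a.length + 1 → d - b.length ≤ i →
      (∀ i' j', i' ≤ a.length → j' ≤ b.length → (i' + j' < d ∨ (i' + j' = d ∧ i' < i)) →
        m.get? (i', j') = some (Lp a b i' j')) →
      ∀ i' j', i' ≤ a.length → j' ≤ b.length → i' + j' ≤ d →
        (diagRowB a b d i cnt m).get? (i', j') = some (Lp a b i' j') := by
  intro cnt
  induction cnt with
  | zero =>
    intro i m hcnt hlo hm i' j' hi' hj' hsum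
    rw [diagRowB]
    rcases Nat.lt_or_ge (i' + j') d with h | h
    · exact hm i' j' hi' hj' (Or.inl h)
    · exact hm i' j' hi' hj' (Or.inr ⟨by omega, by omega⟩)
  | succ cnt ih =>
    intro i m hcnt hlo hm i' j' hi' hj' hsum
    rw [diagRowB]
    have hi_la : i ≤ a.length := by omega
    have hcell : diagCellB a b m i (d - i) = m.insert (i, d - i) (Lp a b i (d - i)) := by
      apply diagCellB_eq a b m i (d - i) hi_la (by omega)
      intro p q hp hq hpq
      exact hm p q hp hq (Or.inl (by omega))
    rw [hcell]
    apply ih (i + 1) _ (by omega) (by omega)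
    intro p q hp hq hpq
    rw [PySem.Dict.get?_insert]
    by_cases hpq2 : (p, q) = (i, d - i)
    · rw [if_pos hpq2]
      obtain ⟨rfl, rfl⟩ := Prod.mk.injEq .. ▸ Prod.ext_iff.1 hpq2
      rfl
    · rw [if_neg hpq2]
      apply hm p q hp hq
      rcases hpq with h | ⟨h1, h2⟩
      · exact Or.inl h
      · by_cases hpi : p = i
        · exact absurd (by rw [Prod.mk.injEq]; exact ⟨hpi, by omega⟩) hpq2
        · exact Or.inr ⟨h1, by omega⟩
    · exact hi'
    · exact hj'
    · exact hsum

lemma diagLoopB_spec (a b : List Char) :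
    ∀ (cnt d : Nat) (m : PySem.Dict (Nat × Nat) Int),
      1 ≤ d → d + cnt ≤ a.length + b.length + 1 → InvB a b m d →
      InvB a b (diagLoopB a b d cnt m) (d + cnt) := by
  intro cnt
  induction cnt with
  | zero => intro d m h1 h2 hm; rw [diagLoopB]; exact hm
  | succ cnt ih =>
    intro d m h1 h2 hm
    rw [diagLoopB]
    have hrow := diagRowB_spec a b d (min d a.length + 1 - (d - b.length)) (d - b.length)
      m (by omega) (by omega)
      (fun i' j' hi' hj' hcase => by
        rcases hcase with h | ⟨hh1, hh2⟩
        · exact hm i' j' hi' hj' h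
        · omega)
    have hnext : InvB a b (diagRowB a b d (d - b.length) (min d a.length + 1 - (d - b.length)) m) (d + 1) := by
      intro i j hi hj hij
      exact hrow i j hi hj (by omega)
    have := ih (d + 1) _ (by omega) (by omega) hnext
    intro i j hi hj hij
    exact this i j hi hj (by omega)

lemma levDiagB_eq (w c : String) :
    levDiagB w c = Lp w.toList c.toList w.toList.length c.toList.length := by
  unfold levDiagB
  have h0 : InvB w.toList c.toList ((PySem.Dict.empty).insert (0, 0) 0) 1 := by
    intro i j hi hj hij
    have hz : i = 0 ∧ j = 0 := by omega
    obtain ⟨rfl, rfl⟩ := hz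
    rw [PySem.Dict.get?_insert_self, Lp_zero_left]
    rfl
  have hloop := diagLoopB_spec w.toList c.toList (w.toList.length + c.toList.length) 1 _ (by omega) (by omega) h0
  have hfin := hloop w.toList.length c.toList.length (le_refl _) (le_refl _) (by omega)
  exact PySem.Dict.getD_of_get?_eq_some _ _ hfin

lemma lev_eq (w c : String) : levDiagB w c = levenshteinA w c := by
  rw [levDiagB_eq, levenshteinA_eq]

-- ===== the per-word selection agrees =====

-- the folding function of PySem.List.min2? at our key functions
def step2 : Option (Int × Int) → (Int × Int) → Option (Int × Int) := fun acc x =>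
  match acc with
  | none => some x
  | some m => if decide (x.1 < m.1) || (!decide (m.1 < x.1) && decide (x.2 < m.2)) then some x else some m

lemma min2?_eq_foldl (xs : List (Int × Int)) :
    PySem.List.min2? xs (fun q => q.1) (fun q => q.2) = xs.foldl step2 none := by
  unfold PySem.List.min2?
  congr 1
  funext acc x
  cases acc <;> simp only [step2]

def stepA (dist : String → Int) : Option String × Option Int → String → Option String × Option Int :=
  fun acc candidate =>
    match acc.2 with
    | none => (some candidate, some (dist candidate))
    | some cd => if dist candidate < cd then (some candidate, some (dist candidate)) else acc

lemma scan_lockstep (ds : List String) (dist : String → Int) :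
    ∀ (l : List String) (k : Nat) (m0 : String) (d0 : Int) (i0 : Int),
      ds.drop k = l → 0 ≤ i0 → i0 < (k : Int) →
      PySem.List.pyGet? ds i0 = some m0 →
      ∃ m1 d1 i1,
        l.foldl (stepA dist) (some m0, some d0) = (some m1, some d1) ∧
        ((PySem.List.enumerate l (k : Int)).map (fun p => (dist p.2, p.1))).foldl step2 (some (d0, i0))
          = some (d1, i1) ∧
        0 ≤ i1 ∧ PySem.List.pyGet? ds i1 = some m1 := by
  intro l
  induction l with
  | nil =>
    intro k m0 d0 i0 hdrop h0 hk hget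
    exact ⟨m0, d0, i0, by simp, by simp, h0, hget⟩
  | cons cand rest ih =>
    intro k m0 d0 i0 hdrop h0 hk hget
    have hcand : PySem.List.pyGet? ds (k : Int) = some cand := by
      rw [PySem.List.pyGet?_natCast]
      have hk0 : ds[k]? = (ds.drop k)[0]? := by simp [List.getElem?_drop]
      rw [hk0, hdrop]; rfl
    have hdrop' : ds.drop (k + 1) = rest := by
      have hdd : ds.drop (k + 1) = (ds.drop k).drop 1 := by rw [List.drop_drop]
      rw [hdd, hdrop]; rfl
    have hkfalse : decide ((k : Int) < i0) = false := by simp; omega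
    rw [PySem.List.enumerate_cons, List.map_cons, List.foldl_cons, List.foldl_cons]
    have hstep2 : step2 (some (d0, i0)) ((fun p => (dist p.2, p.1)) ((k : Int), cand))
        = if dist cand < d0 then some (dist cand, (k : Int)) else some (d0, i0) := by
      simp only [step2, hkfalse]
      by_cases h : dist cand < d0 <;> simp [h]
    have hstepA : stepA dist (some m0, some d0) cand
        = if dist cand < d0 then (some cand, some (dist cand)) else (some m0, some d0) := by
      simp only [stepA]
    have hcast : (k : Int) + 1 = ((k + 1 : Nat) : Int) := by push_cast; ring
    by_cases h : dist cand < d0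
    · rw [hstep2, if_pos h, hstepA, if_pos h, hcast]
      exact ih (k + 1) cand (dist cand) (k : Int) hdrop' (by omega) (by push_cast; omega) hcand
    · rw [hstep2, if_neg h, hstepA, if_neg h, hcast]
      exact ih (k + 1) m0 d0 i0 hdrop' h0 (by push_cast; omega) hget

-- ===== glue =====

lemma contains_ofList_eq {α : Type} [BEq α] [LawfulBEq α] (l : List α) (x : α) :
    (PySem.Set.ofList l).contains x = l.contains x := by
  rw [PySem.Set.contains_eq_listContains]
  by_cases h : x ∈ l
  · simp [h, (PySem.Set.mem_ofList l x).2 h]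
  · have h2 : x ∉ PySem.Set.ofList l := fun hh => h ((PySem.Set.mem_ofList l x).1 hh)
    simp [h, h2]

lemma pvNormalize_eq (w : List Char) : normalizeA w = normalizeB w := by
  unfold normalizeA normalizeB removePunctA pvPunctA pvPunctB
  simp only [contains_ofList_eq]

lemma foldl_insert_get? {ν : Type} (f : String → ν) :
    ∀ (l : List String) (d0 : PySem.Dict String ν) (w : String),
      (l.foldl (fun d x => d.insert x (f x)) d0).get? w = if w ∈ l then some (f w) else d0.get? w := by
  intro l
  induction l with
  | nil => intro d0 w; simp
  | cons x xs ih =>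
    intro d0 w
    simp only [List.foldl_cons, ih]
    by_cases hx : w ∈ xs
    · simp [hx]
    · rw [PySem.Dict.get?_insert]
      by_cases hwx : w = x <;> simp [hx, hwx]

-- per-word result of A (proof-side reading of A's loop body)
def fA (ds : List String) (thr : Int) (w : String) : Option String :=
  if ds.contains w then some w
  else
    match ds.foldl (stepA (fun c => levenshteinA w c)) (none, none) with
    | (some m, some cd) => if cd ≤ thr then some m else none
    | _ => none

-- per-word result of B
def fB (ds : List String) (thr : Int) (w : String) : Option String :=
  if (PySem.Set.ofList ds).contains w then some w
  else if !ds.isEmpty then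
    match PySem.List.min2? ((PySem.List.enumerate ds).map (fun p => (levDiagB w p.2, p.1)))
        (fun q => q.1) (fun q => q.2) with
    | some (d, i) => if d ≤ thr then PySem.List.pyGet? ds i else none
    | none => none
  else none

lemma fA_eq_fB (ds : List String) (thr : Int) (w : String) : fA ds thr w = fB ds thr w := by
  unfold fA fB
  rw [contains_ofList_eq]
  by_cases hmem : ds.contains w = true
  · have hm : w ∈ ds := by simpa using hmem
    simp [hm]
  · rw [if_neg hmem, if_neg hmem]
    cases ds with
    | nil => simp
    | cons c rest =>
      rw [if_pos (by simp)]
      have hfun : (fun p : Int × String => (levDiagB w p.2, p.1))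
          = (fun p : Int × String => ((fun x => levenshteinA w x) p.2, p.1)) := by
        funext p; rw [lev_eq]
      rw [hfun, min2?_eq_foldl, PySem.List.enumerate_cons, List.map_cons, List.foldl_cons,
        List.foldl_cons]
      have h1 : step2 none ((fun p : Int × String => ((fun x => levenshteinA w x) p.2, p.1)) (0, c))
          = some (levenshteinA w c, 0) := rfl
      have h2 : stepA (fun x => levenshteinA w x) (none, none) c
          = (some c, some (levenshteinA w c)) := rfl
      rw [h1, h2]
      have h01 : (0 : Int) + 1 = ((1 : Nat) : Int) := by norm_num
      rw [h01]
      obtain ⟨m1, d1, i1, hA, hB, hpos, hget⟩ :=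
        scan_lockstep (c :: rest) (fun x => levenshteinA w x) rest 1 c (levenshteinA w c) 0
          rfl (by omega) (by norm_num) (PySem.List.pyGet?_zero_cons c rest)
      rw [hA, hB]
      simp [hget]


-- ===== assembling the two programs =====

lemma step2_foldl_some : ∀ (xs : List (Int × Int)) (a : Int × Int),
    ∃ r, xs.foldl step2 (some a) = some r := by
  intro xs
  induction xs with
  | nil => intro a; exact ⟨a, rfl⟩
  | cons x rest ih =>
    intro a
    rw [List.foldl_cons]
    show ∃ r, rest.foldl step2 (step2 (some a) x) = some r
    by_cases h : (decide (x.1 < a.1) || (!decide (a.1 < x.1) && decide (x.2 < a.2))) = true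
    · have : step2 (some a) x = some x := by simp only [step2, h]; rfl
      rw [this]; exact ih x
    · have : step2 (some a) x = some a := by
        simp only [step2]
        rw [if_neg (by simpa using h)]
      rw [this]; exact ih a

-- A's word loop, with its literal body, appends exactly fA per word
lemma koreksiA_loop (ds : List String) (thr : Int) :
    ∀ (ws : List String) (out : List String),
      ws.foldl (fun corrected w =>
        if ds.contains w then corrected ++ [w]
        else
          let best := ds.foldl (fun acc candidate =>
              match acc.2 with
              | none => (some candidate, some (levenshteinA w candidate))
              | some cd => if levenshteinA w candidate < cd then (some candidate, some (levenshteinA w candidate)) else acc)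
            ((none : Option String), (none : Option Int))
          match best with
          | (some m, some cd) => if cd ≤ thr then corrected ++ [m] else corrected
          | _ => corrected) out
      = out ++ ws.filterMap (fA ds thr) := by
  intro ws
  induction ws with
  | nil => intro out; simp
  | cons w rest ih =>
    intro out
    rw [List.foldl_cons, ih]
    have hbody : (if ds.contains w then out ++ [w]
        else
          let best := ds.foldl (fun acc candidate =>
              match acc.2 with
              | none => (some candidate, some (levenshteinA w candidate))
              | some cd => if levenshteinA w candidate < cd then (some candidate, some (levenshteinA w candidate)) else acc)
            ((none : Option String), (none : Option Int))
          match best with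
          | (some m, some cd) => if cd ≤ thr then out ++ [m] else out
          | _ => out)
        = out ++ (fA ds thr w).toList := by
      unfold fA
      by_cases hc : ds.contains w = true
      · have hm : w ∈ ds := by simpa using hc
        simp [hm]
      · rw [if_neg hc, if_neg hc]
        show (match ds.foldl (stepA (fun c => levenshteinA w c)) (none, none) with
          | (some m, some cd) => if cd ≤ thr then out ++ [m] else out
          | _ => out) = _
        rcases hres : ds.foldl (stepA (fun c => levenshteinA w c)) (none, none) with ⟨o1, o2⟩
        cases o1 with
        | none => cases o2 <;> simp
        | some m =>
          cases o2 with
          | none => simp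
          | some cd => by_cases ht : cd ≤ thr <;> simp [ht]
    rw [hbody]
    cases h : fA ds thr w <;> simp [h]

-- B's cache loop body always inserts fB for its word
lemma korB_body (ds : List String) (thr : Int) (corr : PySem.Dict String (Option String)) (w : String) :
    (if (PySem.Set.ofList ds).contains w then corr.insert w (some w)
     else if !ds.isEmpty then
       match PySem.List.min2? ((PySem.List.enumerate ds).map (fun p => (levDiagB w p.2, p.1)))
           (fun q => q.1) (fun q => q.2) with
       | some (d, i) => corr.insert w (if d ≤ thr then PySem.List.pyGet? ds i else none)
       | none => corr
     else corr.insert w none)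
    = corr.insert w (fB ds thr w) := by
  unfold fB
  by_cases hc : (PySem.Set.ofList ds).contains w = true
  · have hm : w ∈ PySem.Set.ofList ds := by simpa using hc
    simp [hm]
  · rw [if_neg hc, if_neg hc]
    cases ds with
    | nil => simp
    | cons c rest =>
      rw [if_pos (by simp), if_pos (by simp)]
      have hsome : ∃ r, PySem.List.min2?
          ((PySem.List.enumerate (c :: rest)).map (fun p => (levDiagB w p.2, p.1)))
          (fun q : Int × Int => q.1) (fun q : Int × Int => q.2) = some r := by
        rw [min2?_eq_foldl, PySem.List.enumerate_cons, List.map_cons, List.foldl_cons]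
        exact step2_foldl_some _ _
      obtain ⟨r, hr⟩ := hsome
      rw [hr]

lemma korB_get (ds : List String) (thr : Int) (ws : List String) (w : String) (hw : w ∈ ws) :
    ((PySem.List.dedup ws).foldl (fun corr w =>
        if (PySem.Set.ofList ds).contains w then corr.insert w (some w)
        else if !ds.isEmpty then
          match PySem.List.min2? ((PySem.List.enumerate ds).map (fun p => (levDiagB w p.2, p.1)))
              (fun q => q.1) (fun q => q.2) with
          | some (d, i) => corr.insert w (if d ≤ thr then PySem.List.pyGet? ds i else none)
          | none => corr
        else corr.insert w none) PySem.Dict.empty).get? w = some (fB ds thr w) := by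
  rw [PySem.List.foldl_congr_mem' (PySem.List.dedup ws) _
    (fun corr x => corr.insert x (fB ds thr x)) PySem.Dict.empty
    (fun x _ corr => korB_body ds thr corr x)]
  rw [foldl_insert_get? (fB ds thr) (PySem.List.dedup ws) PySem.Dict.empty w]
  rw [if_pos ((PySem.List.mem_dedup ws w).2 hw)]

-- ===== VERDICT (by name: the statement is the Claim_ definition above) =====
lemma korB_eq (inp : String) (ds : List String) (thr : Int) (h : ¬ inp = "") :
    koreksi_ingredients_alt inp ds thr
      = ((PySem.Chars.splitOn inp.toList [',']).map normalizeB).filterMap (fB ds thr) := by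
  simp only [koreksi_ingredients_alt]
  rw [if_neg h]
  exact List.filterMap_congr (fun x hx => by
    simp only [korB_get ds thr _ x hx, Option.getD_some])

theorem koreksi_ingredients_spec : Claim_equal_koreksi_ingredients := by
  unfold Claim_equal_koreksi_ingredients
  intro inp ds thr _
  unfold Spec_koreksi_ingredients
  by_cases h : inp = ""
  · simp [koreksi_ingredients, koreksi_ingredients_alt, h]
  · rw [korB_eq inp ds thr h]
    simp only [koreksi_ingredients]
    rw [if_neg h, koreksiA_loop, List.nil_append]
    have hwords : (PySem.Chars.splitOn inp.toList [',']).map normalizeA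
        = (PySem.Chars.splitOn inp.toList [',']).map normalizeB :=
      List.map_congr_left (fun w _ => pvNormalize_eq w)
    rw [hwords]
    exact List.filterMap_congr (fun x _ => fA_eq_fB ds thr x)
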